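-- pv_equiv track=rewrite | github.com/PoeticPremium6/ChapterFOLD | core/impose_service.py | signature_sheet_pairs
-- ===== SOURCE A (Python) =====
-- from typing import List, Optional, Tuple
--
-- def signature_sheet_pairs(pages_per_signature: int) -> List[Tuple[Tuple[int, int], Tuple[int, int]]]:
--     """
--     Return sheet pairings for one signature.
--
--     Example for 16 pages:
--       sheet 1 front: (16, 1), back: (2, 15)
--       sheet 2 front: (14, 3), back: (4, 13)
--       sheet 3 front: (12, 5), back: (6, 11)
--       sheet 4 front: (10, 7), back: (8, 9)
--     """
--     if pages_per_signature % 4 != 0: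
--         raise ValueError("Pages per signature must be a multiple of 4")
--
--     sheets = []
--     low = 1
--     high = pages_per_signature
--
--     while low < high:
--         front = (high, low)
--         back = (low + 1, high - 1)
--         sheets.append((front, back))
--         low += 2
--         high -= 2
--
--     return sheets
-- ===== SOURCE B (Python) =====
-- from typing import List, Tuple
--
-- def signature_sheet_pairs(pages_per_signature: int) -> List[Tuple[Tuple[int, int], Tuple[int, int]]]:
--     if pages_per_signature % 4 != 0:
--         raise ValueError("Pages per signature must be a multiple of 4")
--     n = pages_per_signature
--     # Stage 1: flat list of page numbers in imposition order, e.g. [16,1,2,15,14,3,4,13,...]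
--     seq = []
--     for s in range(max(n // 4, 0)):
--         lo = 2 * s + 1
--         hi = n - 2 * s
--         seq.extend((hi, lo, lo + 1, hi - 1))
--     # Stage 2: chunk the flat list four at a time into ((front), (back)) pairs
--     it = iter(seq)
--     return [((a, b), (c, d)) for a, b, c, d in zip(it, it, it, it)]
-- ===== Notes on version B (the rewrite author's own statement) =====
-- stated objective: alternative
-- what changed: Replaces the single converging two-pointer while-loop by two stages: first build a flat list of page numbers in imposition order from a per-sheet closed form, then chunk that list four at a time into (front, back) pairs.
import Mathlib
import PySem

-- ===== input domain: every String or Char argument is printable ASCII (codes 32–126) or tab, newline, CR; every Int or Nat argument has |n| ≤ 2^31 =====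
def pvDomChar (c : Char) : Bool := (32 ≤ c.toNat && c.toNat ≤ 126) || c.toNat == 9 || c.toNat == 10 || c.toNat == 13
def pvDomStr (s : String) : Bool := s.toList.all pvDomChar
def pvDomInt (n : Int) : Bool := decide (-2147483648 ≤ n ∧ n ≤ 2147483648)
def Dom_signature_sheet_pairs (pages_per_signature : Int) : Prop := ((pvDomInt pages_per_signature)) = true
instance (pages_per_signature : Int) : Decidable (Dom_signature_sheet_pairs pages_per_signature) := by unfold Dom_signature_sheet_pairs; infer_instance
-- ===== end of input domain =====

-- B replaces A's converging two-pointer while-loop by two passes: build a flat imposition-order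
-- page list from a per-sheet closed form, then chunk it four at a time (objective: alternative).

-- ===== PORT A =====
-- the converging two-pointer while-loop of A
def sspLoop (low high : Int) : List ((Int × Int) × (Int × Int)) :=
  if low < high then
    ((high, low), (low + 1, high - 1)) :: sspLoop (low + 2) (high - 2)
  else []
termination_by (high - low).toNat
decreasing_by omega

def signature_sheet_pairs (pages_per_signature : Int) : List ((Int × Int) × (Int × Int)) :=
  if PySem.Int.mod pages_per_signature 4 ≠ 0 then []   -- Python raises ValueError here (outside Pre_)
  else sspLoop 1 pages_per_signature

-- ===== PORT B =====
-- B's second pass: take four page numbers at a time from the flat list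
def sspChunk : List Int → List ((Int × Int) × (Int × Int))
  | a :: b :: c :: d :: rest => ((a, b), (c, d)) :: sspChunk rest
  | _ => []

def signature_sheet_pairs_alt (pages_per_signature : Int) : List ((Int × Int) × (Int × Int)) :=
  if PySem.Int.mod pages_per_signature 4 ≠ 0 then []   -- Python raises ValueError here (outside Pre_)
  else
    sspChunk ((PySem.List.pyRange 0 (max (PySem.Int.floordiv pages_per_signature 4) 0) 1).foldl
      (fun seq s =>
        seq ++ [pages_per_signature - 2 * s, 2 * s + 1, 2 * s + 1 + 1, pages_per_signature - 2 * s - 1]) [])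

-- ===== PRECONDITION & SPEC =====
-- Pre_ excludes exactly the inputs on which A raises ValueError (not a multiple of 4)
def Pre_signature_sheet_pairs (pages_per_signature : Int) : Prop :=
  PySem.Int.mod pages_per_signature 4 = 0
instance (pages_per_signature : Int) : Decidable (Pre_signature_sheet_pairs pages_per_signature) := by
  unfold Pre_signature_sheet_pairs; infer_instance

def pvWitness_signature_sheet_pairs : Int := 16

def Spec_signature_sheet_pairs (pages_per_signature : Int) (out : List ((Int × Int) × (Int × Int))) : Prop := out = signature_sheet_pairs_alt pages_per_signature
instance (pages_per_signature : Int) (out : List ((Int × Int) × (Int × Int))) : Decidable (Spec_signature_sheet_pairs pages_per_signature out) := by unfold Spec_signature_sheet_pairs; infer_instance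

-- ===== CLAIM (what is proved, stated in full; the proofs are below) =====
def Claim_equal_signature_sheet_pairs : Prop := ∀ (pages_per_signature : Int), Dom_signature_sheet_pairs pages_per_signature → Pre_signature_sheet_pairs pages_per_signature → Spec_signature_sheet_pairs pages_per_signature (signature_sheet_pairs pages_per_signature)

-- ===== LEMMAS AND PROOFS =====

-- A's loop, characterised: when hi - lo + 1 = 4*m it produces exactly m sheets, s-th sheet
-- ((hi - 2s, lo + 2s), (lo + 2s + 1, hi - 2s - 1)).
lemma sspLoop_eq : ∀ (m : Nat) (lo hi : Int), hi - lo + 1 = 4 * m →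
    sspLoop lo hi = (List.range m).map
      (fun s : Nat => ((hi - 2 * (s : Int), lo + 2 * (s : Int)),
        (lo + 2 * (s : Int) + 1, hi - 2 * (s : Int) - 1))) := by
  intro m
  induction m with
  | zero =>
      intro lo hi h
      rw [sspLoop, if_neg (by omega)]
      simp
  | succ k ih =>
      intro lo hi h
      rw [sspLoop, if_pos (by push_cast at h; omega),
        ih (lo + 2) (hi - 2) (by push_cast at h; omega),
        List.range_succ_eq_map, List.map_cons, List.map_map]
      refine congrArg₂ _ (by simp) ?_
      refine List.map_congr_left fun s _ => ?_
      simp [Function.comp]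
      refine ⟨⟨by ring, by ring⟩, by ring, by ring⟩

-- folding "++ block" over a list is flatMap of the blocks
lemma foldl_append_blocks (f : Int → List Int) :
    ∀ (xs : List Int) (init : List Int),
      xs.foldl (fun acc s => acc ++ f s) init = init ++ xs.flatMap f := by
  intro xs
  induction xs with
  | nil => simp
  | cons a t ih => intro init; simp [List.foldl_cons, ih, List.flatMap_cons]

-- chunking a flat list of 4-element blocks yields one pair of pairs per block
lemma sspChunk_flatMap {α : Type} (f₁ f₂ f₃ f₄ : α → Int) :
    ∀ xs : List α,
      sspChunk (xs.flatMap fun s => [f₁ s, f₂ s, f₃ s, f₄ s]) =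
        xs.map fun s => ((f₁ s, f₂ s), (f₃ s, f₄ s)) := by
  intro xs
  induction xs with
  | nil => rfl
  | cons a t ih => simp [List.flatMap_cons, sspChunk, ih]

-- ===== VERDICT (by name: the statement is the Claim_ definition above) =====
theorem signature_sheet_pairs_spec : Claim_equal_signature_sheet_pairs := by
  intro n _ hpre
  unfold Pre_signature_sheet_pairs at hpre
  unfold Spec_signature_sheet_pairs signature_sheet_pairs signature_sheet_pairs_alt
  rw [if_neg (by simpa using hpre), if_neg (by simpa using hpre)]
  have hmod : n % 4 = 0 := by
    rwa [PySem.Int.mod_eq_emod_of_pos (by norm_num)] at hpre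
  have hfd : PySem.Int.floordiv n 4 = n / 4 :=
    PySem.Int.floordiv_eq_ediv_of_pos (by norm_num)
  rw [hfd]
  rw [foldl_append_blocks]
  simp only [List.nil_append]
  rw [PySem.List.pyRange_one]
  rw [List.flatMap_map, sspChunk_flatMap _ _ _ _]
  by_cases hn : 0 < n
  · have hmax : max (n / 4) 0 = n / 4 := by omega
    have hM : n - 1 + 1 = 4 * ((n / 4 - 0).toNat : Int) := by omega
    rw [sspLoop_eq ((n / 4 - 0).toNat) 1 n (by exact_mod_cast hM), hmax]
    refine List.map_congr_left fun s hs => ?_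
    refine Prod.ext (Prod.ext ?_ ?_) (Prod.ext ?_ ?_) <;> dsimp <;> ring
  · have hmax : max (n / 4) 0 = 0 := by omega
    rw [sspLoop, if_neg (by omega), hmax]
    simp
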